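-- pv_equiv track=rewrite | github.com/yuki9965/my-algorithm | 头条高频/84. 柱状图中最大的矩形.py | findToRight
-- ===== SOURCE A (Python) =====
-- def findToRight(heights):
--     right = [None for i in range(len(heights))]
--     stack = []
--
--     for i in range(len(heights)):
--         while stack and heights[stack[-1]] > heights[i]:
--             right[stack.pop()] = i - 1
--         stack.append(i)
--
--     while stack:
--         index = stack.pop()
--         right[index] = len(heights) - 1
--
--     return right
-- ===== SOURCE B (Python) =====
-- def findToRight(heights):
--     n = len(heights)
--     right = []
--     for j in range(n):
--         k = j
--         while k + 1 < n and heights[k + 1] >= heights[j]: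
--             k += 1
--         right.append(k)
--     return right
-- ===== Notes on version B (the rewrite author's own statement) =====
-- stated objective: simpler
-- what changed: Replaces the monotonic-stack single pass (pop on strictly smaller, backfill remainder with n-1) by a direct per-bar rightward scan: for each bar advance a pointer while the next bar is >= it and record where it stops.
import Mathlib
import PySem

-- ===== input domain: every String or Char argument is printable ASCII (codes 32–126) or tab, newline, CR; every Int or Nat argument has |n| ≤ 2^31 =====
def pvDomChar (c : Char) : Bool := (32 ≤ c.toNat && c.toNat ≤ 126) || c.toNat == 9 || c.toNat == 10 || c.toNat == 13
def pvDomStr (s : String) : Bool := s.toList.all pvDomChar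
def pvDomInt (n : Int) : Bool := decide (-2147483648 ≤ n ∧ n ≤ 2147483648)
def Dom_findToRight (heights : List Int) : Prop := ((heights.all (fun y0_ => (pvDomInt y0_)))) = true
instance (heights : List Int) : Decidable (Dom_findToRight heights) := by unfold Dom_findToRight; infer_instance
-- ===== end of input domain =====

-- B replaces A's monotonic-stack pass by a plain per-bar rightward scan (simpler, not faster); return values proved equal.

-- ===== PORT A =====
-- inner `while stack and heights[stack[-1]] > heights[i]` loop; the Python stack's top is the head here
def pvPop (heights : List Int) (i : Int) : List (Option Int) → List Int → List (Option Int) × List Int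
  | right, [] => (right, [])
  | right, top :: rest =>
      if PySem.List.pyGetD heights top 0 > PySem.List.pyGetD heights i 0 then
        -- indices on the stack and i are always in range, so pyGetD/pySetD are exact here
        pvPop heights i (PySem.List.pySetD right top (some (i - 1))) rest
      else (right, top :: rest)

def findToRight (heights : List Int) : List (Option Int) :=
  let n : Int := heights.length
  let step := (PySem.List.pyRange 0 n 1).foldl
      (fun (st : List (Option Int) × List Int) i =>
        let st' := pvPop heights i st.1 st.2
        (st'.1, i :: st'.2))
      ((List.range heights.length).map (fun _ => none), [])
  step.2.foldl (fun r index => PySem.List.pySetD r index (some (n - 1))) step.1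

-- ===== PORT B =====
-- inner `while k + 1 < n and heights[k+1] >= heights[j]` loop; fuel n ≥ n - k makes it structural
def pvScanF (heights : List Int) (hj : Int) : Nat → Nat → Nat
  | 0, k => k
  | fuel + 1, k =>
      if k + 1 < heights.length ∧ hj ≤ heights.getD (k + 1) 0 then
        pvScanF heights hj fuel (k + 1)
      else k

def pvScan (heights : List Int) (hj : Int) (k : Nat) : Nat :=
  pvScanF heights hj heights.length k

def findToRight_alt (heights : List Int) : List (Option Int) :=
  (List.range heights.length).map
    (fun j => some ((pvScan heights (heights.getD j 0) j : Nat) : Int))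

-- ===== PRECONDITION & SPEC =====
def Spec_findToRight (heights : List Int) (out : List (Option Int)) : Prop := out = findToRight_alt heights
instance (heights : List Int) (out : List (Option Int)) : Decidable (Spec_findToRight heights out) := by unfold Spec_findToRight; infer_instance

-- ===== CLAIM (what is proved, stated in full; the proofs are below) =====
def Claim_equal_findToRight : Prop := ∀ (heights : List Int), Dom_findToRight heights → Spec_findToRight heights (findToRight heights)

-- ===== LEMMAS AND PROOFS =====

-- The scan stops exactly at k when everything in (s, k] is ≥ hj and k is the end or the next bar is strictly smaller.
lemma pvScanF_eq (heights : List Int) (hj : Int) (fuel s k : Nat)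
    (hsk : s ≤ k) (hk : k < heights.length) (hfuel : k - s ≤ fuel)
    (hall : ∀ m : Nat, s < m → m ≤ k → hj ≤ heights.getD m 0)
    (hstop : k + 1 < heights.length → heights.getD (k + 1) 0 < hj) :
    pvScanF heights hj fuel s = k := by
  induction fuel generalizing s with
  | zero =>
    have : s = k := by omega
    simp [pvScanF, this]
  | succ fuel ih =>
    by_cases hs : s = k
    · subst hs
      simp only [pvScanF]
      rw [if_neg]
      rintro ⟨h1, h2⟩
      exact absurd (hstop h1) (by omega)
    · have hlt : s < k := lt_of_le_of_ne hsk hs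
      simp only [pvScanF]
      rw [if_pos ⟨by omega, hall (s + 1) (by omega) (by omega)⟩]
      exact ih (s + 1) (by omega) (by omega)
        (fun m h1 h2 => hall m (by omega) h2)

lemma pvScan_eq (heights : List Int) (hj : Int) (s k : Nat)
    (hsk : s ≤ k) (hk : k < heights.length)
    (hall : ∀ m : Nat, s < m → m ≤ k → hj ≤ heights.getD m 0)
    (hstop : k + 1 < heights.length → heights.getD (k + 1) 0 < hj) :
    pvScan heights hj s = k := by
  exact pvScanF_eq heights hj heights.length s k hsk hk (by omega) hall hstop

-- What the pop loop does to a well-formed stack at step i.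
lemma pvPop_spec (heights : List Int) (i : Nat) (hin : i < heights.length) :
    ∀ (stack : List Int) (right : List (Option Int)),
    (∀ x ∈ stack, ∃ j : Nat, x = (j : Int) ∧ j < i ∧
        ∀ m : Nat, j < m → m < i → heights.getD j 0 ≤ heights.getD m 0) →
    stack.Pairwise (· > ·) →
    right.length = heights.length →
    (∀ j : Nat, j < heights.length → ((j : Int) ∉ stack) → j < i →
        right.getD j none = some ((pvScan heights (heights.getD j 0) j : Nat) : Int)) →
    ∃ stack2 right2,
      pvPop heights (i : Int) right stack = (right2, stack2) ∧
      (∀ x ∈ stack2, x ∈ stack ∧ ∃ j : Nat, x = (j : Int) ∧ heights.getD j 0 ≤ heights.getD i 0) ∧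
      stack2.Pairwise (· > ·) ∧
      right2.length = heights.length ∧
      (∀ j : Nat, j < heights.length → ((j : Int) ∉ stack2) → j < i →
          right2.getD j none = some ((pvScan heights (heights.getD j 0) j : Nat) : Int)) := by
  intro stack
  induction stack with
  | nil =>
    intro right _ _ hlen hr
    exact ⟨[], right, by simp [pvPop], by simp, by simp, hlen, hr⟩
  | cons top rest ih =>
    intro right hP1 hP2 hlen hr
    obtain ⟨j0, rfl, hj0i, hcond⟩ := hP1 top (List.mem_cons_self)
    obtain ⟨htoprest, hP2rest⟩ := List.pairwise_cons.mp hP2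
    by_cases hpop : heights.getD i 0 < heights.getD j0 0
    · -- pop: heights[stack[-1]] > heights[i]
      have hstep : pvPop heights (i : Int) right ((j0 : Int) :: rest)
          = pvPop heights (i : Int) (PySem.List.pySetD right (j0 : Int) (some ((i : Int) - 1))) rest := by
        simp only [pvPop]
        rw [if_pos (by simpa only [PySem.List.pyGetD_natCast] using hpop)]
      have hj0len : j0 < right.length := by omega
      have hsv : pvScan heights (heights.getD j0 0) j0 = i - 1 :=
        pvScan_eq heights _ j0 (i - 1) (by omega) (by omega)
          (fun m h1 h2 => hcond m h1 (by omega))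
          (fun _ => by
            have he : i - 1 + 1 = i := by omega
            rw [he]; exact hpop)
      have hset : PySem.List.pySetD right (j0 : Int) (some ((i : Int) - 1))
          = right.set j0 (some ((i : Int) - 1)) := by
        simp
      have hr' : ∀ j : Nat, j < heights.length → ((j : Int) ∉ rest) → j < i →
          (PySem.List.pySetD right (j0 : Int) (some ((i : Int) - 1))).getD j none
            = some ((pvScan heights (heights.getD j 0) j : Nat) : Int) := by
        intro j hjlen hjrest hji
        rw [hset]
        by_cases hjj : j = j0
        · subst hjj
          rw [hsv]
          have : ((↑(i - 1) : Int)) = (i : Int) - 1 := by omega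
          rw [this]
          simp [List.getD, hj0len]
        · rw [show ((right.set j0 (some ((i : Int) - 1))).getD j none) = right.getD j none by
            simp [List.getD, List.getElem?_set_ne (fun h => hjj h.symm)]]
          refine hr j hjlen ?_ hji
          simp only [List.mem_cons, not_or]
          exact ⟨by exact_mod_cast hjj, hjrest⟩
      obtain ⟨stack2, right2, heq, hC1, hC2, hC3, hC4⟩ :=
        ih (PySem.List.pySetD right (j0 : Int) (some ((i : Int) - 1)))
          (fun x hx => hP1 x (List.mem_cons_of_mem _ hx)) hP2rest
          (by rw [hset]; simpa using hlen) hr'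
      exact ⟨stack2, right2, hstep.trans heq,
        fun x hx => ⟨List.mem_cons_of_mem _ (hC1 x hx).1, (hC1 x hx).2⟩, hC2, hC3, hC4⟩
    · -- stop: heights[stack[-1]] <= heights[i], loop ends
      rw [not_lt] at hpop
      have hstep : pvPop heights (i : Int) right ((j0 : Int) :: rest) = (right, (j0 : Int) :: rest) := by
        simp only [pvPop]
        rw [if_neg (by simpa only [PySem.List.pyGetD_natCast, not_lt] using hpop)]
      refine ⟨(j0 : Int) :: rest, right, hstep, ?_, hP2, hlen, hr⟩
      intro x hx
      refine ⟨hx, ?_⟩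
      rcases List.mem_cons.mp hx with h | h
      · exact ⟨j0, h, hpop⟩
      · obtain ⟨j, rfl, hji, hjcond⟩ := hP1 _ (List.mem_cons_of_mem _ h)
        have hjj0 : j < j0 := by exact_mod_cast htoprest _ h
        exact ⟨j, rfl, le_trans (hjcond j0 hjj0 hj0i) hpop⟩

-- A's loop state (right, stack) after the first i iterations, in Nat-indexed form.
def pvState (heights : List Int) (i : Nat) : List (Option Int) × List Int :=
  (List.range i).foldl
    (fun (st : List (Option Int) × List Int) (j : Nat) =>
      let st' := pvPop heights (j : Int) st.1 st.2
      (st'.1, (j : Int) :: st'.2))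
    ((List.range heights.length).map (fun _ => none), [])

-- Invariant of A's main loop after the first i iterations.
lemma loop_inv (heights : List Int) (i : Nat) (hi : i ≤ heights.length) :
    (∀ x ∈ (pvState heights i).2, ∃ j : Nat, x = (j : Int) ∧ j < i ∧
        ∀ m : Nat, j < m → m < i → heights.getD j 0 ≤ heights.getD m 0) ∧
    (pvState heights i).2.Pairwise (· > ·) ∧
    (pvState heights i).1.length = heights.length ∧
    (∀ j : Nat, j < heights.length → ((j : Int) ∉ (pvState heights i).2) → j < i →
        (pvState heights i).1.getD j none
          = some ((pvScan heights (heights.getD j 0) j : Nat) : Int)) := by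
  induction i with
  | zero =>
    refine ⟨by simp [pvState], by simp [pvState], by simp [pvState], by omega⟩
  | succ i ih =>
    have hilt : i < heights.length := by omega
    obtain ⟨P1, P2, P3, P4⟩ := ih (by omega)
    obtain ⟨stack2, right2, heq, C1, C2, C3, C4⟩ := pvPop_spec heights i hilt _ _ P1 P2 P3 P4
    have hunf : pvState heights (i + 1) = (right2, (i : Int) :: stack2) := by
      rw [pvState, List.range_succ, List.foldl_append]
      show (let st' := pvPop heights (i : Int) (pvState heights i).1 (pvState heights i).2
            ((st'.1, (i : Int) :: st'.2) : List (Option Int) × List Int))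
          = (right2, (i : Int) :: stack2)
      rw [heq]
    rw [hunf]
    refine ⟨?_, ?_, C3, ?_⟩
    · intro x hx
      rcases List.mem_cons.mp hx with h | h
      · exact ⟨i, h, by omega, fun m h1 h2 => by omega⟩
      · obtain ⟨hmem, j, rfl, hle⟩ := C1 x h
        obtain ⟨j', hjj', hj'i, hcond⟩ := P1 _ hmem
        have : j = j' := by exact_mod_cast hjj'
        subst this
        refine ⟨j, rfl, by omega, fun m h1 h2 => ?_⟩
        by_cases hm : m < i
        · exact hcond m h1 hm
        · have : m = i := by omega
          subst this
          exact hle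
    · refine List.pairwise_cons.mpr ⟨?_, C2⟩
      intro x hx
      obtain ⟨hmem, j, rfl, _⟩ := C1 x hx
      obtain ⟨j', hjj', hj'i, _⟩ := P1 _ hmem
      have : j = j' := by exact_mod_cast hjj'
      exact_mod_cast by omega
    · intro j hjlen hnot hji
      have hji' : j ≠ i := by
        intro h
        exact hnot (by rw [h]; exact List.mem_cons_self)
      exact C4 j hjlen (fun h => hnot (List.mem_cons_of_mem _ h)) (by omega)

-- The trailing while loop sets every index still on the stack to n - 1.
lemma final_fold (v : Option Int) :
    ∀ (stack : List Int) (right : List (Option Int)),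
    (∀ x ∈ stack, ∃ j : Nat, x = (j : Int) ∧ j < right.length) →
    (stack.foldl (fun r x => PySem.List.pySetD r x v) right).length = right.length ∧
    (∀ j : Nat, j < right.length →
      (stack.foldl (fun r x => PySem.List.pySetD r x v) right).getD j none
        = if (j : Int) ∈ stack then v else right.getD j none) := by
  intro stack
  induction stack with
  | nil => intro right _; simp
  | cons x rest ih =>
    intro right hmem
    obtain ⟨j0, rfl, hj0⟩ := hmem x List.mem_cons_self
    have hset : PySem.List.pySetD right ((j0 : Nat) : Int) v = right.set j0 v := by simp
    have hlen : (right.set j0 v).length = right.length := by simp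
    have hmem' : ∀ x ∈ rest, ∃ j : Nat, x = (j : Int) ∧ j < (right.set j0 v).length := by
      intro x hx
      obtain ⟨j, rfl, hj⟩ := hmem x (List.mem_cons_of_mem _ hx)
      exact ⟨j, rfl, by omega⟩
    obtain ⟨ihlen, ihget⟩ := ih (right.set j0 v) hmem'
    have hfold : ((((j0 : Nat) : Int) :: rest).foldl (fun r x => PySem.List.pySetD r x v) right)
        = rest.foldl (fun r x => PySem.List.pySetD r x v) (right.set j0 v) := by
      rw [List.foldl_cons, hset]
    constructor
    · rw [hfold, ihlen, hlen]
    · intro j hjlen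
      rw [hfold, ihget j (by omega)]
      by_cases hjr : (j : Int) ∈ rest
      · simp [hjr]
      · rw [if_neg hjr]
        by_cases hjj : j = j0
        · subst hjj
          rw [if_pos List.mem_cons_self]
          simp [List.getD, hj0]
        · rw [if_neg (by
            simp only [List.mem_cons, not_or]
            exact ⟨by exact_mod_cast hjj, hjr⟩)]
          simp [List.getD, List.getElem?_set_ne (fun h => hjj h.symm)]

-- ===== VERDICT (by name: the statement is the Claim_ definition above) =====
theorem findToRight_spec : Claim_equal_findToRight := by
  intro heights _
  unfold Spec_findToRight
  have hstep : ((PySem.List.pyRange 0 (heights.length : Int) 1).foldl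
      (fun (st : List (Option Int) × List Int) i =>
        let st' := pvPop heights i st.1 st.2
        (st'.1, i :: st'.2))
      ((List.range heights.length).map (fun _ => none), [])) = pvState heights heights.length := by
    rw [PySem.List.pyRange_zero_nat, List.foldl_map]
    rfl
  have hfr : findToRight heights = (pvState heights heights.length).2.foldl
      (fun r index => PySem.List.pySetD r index (some ((heights.length : Int) - 1)))
      (pvState heights heights.length).1 := by
    simp only [findToRight]
    rw [hstep]
  obtain ⟨P1, P2, P3, P4⟩ := loop_inv heights heights.length le_rfl
  obtain ⟨flen, fget⟩ := final_fold (some ((heights.length : Int) - 1))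
      (pvState heights heights.length).2 (pvState heights heights.length).1
      (fun x hx => by
        obtain ⟨j, rfl, hj, _⟩ := P1 x hx
        exact ⟨j, rfl, by omega⟩)
  apply List.ext_getElem
  · rw [hfr, flen, P3, findToRight_alt, List.length_map, List.length_range]
  · intro j hj1 hj2
    have hjn : j < heights.length := by
      rw [hfr, flen, P3] at hj1
      exact hj1
    have hrhs : (findToRight_alt heights)[j] = some ((pvScan heights (heights.getD j 0) j : Nat) : Int) := by
      simp [findToRight_alt, List.getElem_map, hjn]
    have hL : (findToRight heights)[j] = (findToRight heights).getD j none :=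
      (List.getD_eq_getElem _ none hj1).symm
    rw [hrhs, hL, hfr]
    rw [fget j (by rw [P3]; exact hjn)]
    by_cases hmem : (j : Int) ∈ (pvState heights heights.length).2
    · rw [if_pos hmem]
      obtain ⟨j', hjj', hj', hcond⟩ := P1 _ hmem
      have hjeq : j = j' := by exact_mod_cast hjj'
      subst hjeq
      have hsv : pvScan heights (heights.getD j 0) j = heights.length - 1 :=
        pvScan_eq heights _ j (heights.length - 1) (by omega) (by omega)
          (fun m h1 h2 => hcond m h1 (by omega))
          (fun h => by omega)
      rw [hsv]
      congr 1
      omega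
    · rw [if_neg hmem]
      exact P4 j hjn hmem hjn
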